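-- pv_equiv track=rewrite | github.com/lastphoenx/SlitProjektHub | src/m11_role_markdown.py | extract_prose_intro
-- ===== SOURCE A (Python) =====
-- def extract_prose_intro(markdown_content: str) -> str:
--     """Extract prose introduction from role markdown (text before first ## header).
--
--     Args:
--         markdown_content: Full markdown document content
--
--     Returns:
--         Prose introduction text (empty string if none found)
--     """
--     if not markdown_content or not markdown_content.strip():
--         return ""
--
--     lines = markdown_content.splitlines()
--     prose_lines = []
--
--     for line in lines:
--         # Stop at first H2 header
--         if line.startswith("## "):
--             break
--         prose_lines.append(line)
--
--     return "\n".join(prose_lines).strip()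
-- ===== SOURCE B (Python) =====
-- def extract_prose_intro(markdown_content: str) -> str:
--     """Extract prose introduction from role markdown (text before first ## header)."""
--     if not markdown_content or not markdown_content.strip():
--         return ""
--     normalized = "\n".join(markdown_content.splitlines())
--     if normalized.startswith("## "):
--         return ""
--     idx = normalized.find("\n## ")
--     if idx == -1:
--         return normalized.strip()
--     return normalized[:idx].strip()
-- ===== Notes on version B (the rewrite author's own statement) =====
-- stated objective: idiomatic
-- what changed: B replaces A's line-by-line loop with break by one whole-string substring search: it normalizes line endings via splitlines/join, then cuts the prefix at the first line starting with '## ' found by find("\n## ") plus a slice.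
import Mathlib
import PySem

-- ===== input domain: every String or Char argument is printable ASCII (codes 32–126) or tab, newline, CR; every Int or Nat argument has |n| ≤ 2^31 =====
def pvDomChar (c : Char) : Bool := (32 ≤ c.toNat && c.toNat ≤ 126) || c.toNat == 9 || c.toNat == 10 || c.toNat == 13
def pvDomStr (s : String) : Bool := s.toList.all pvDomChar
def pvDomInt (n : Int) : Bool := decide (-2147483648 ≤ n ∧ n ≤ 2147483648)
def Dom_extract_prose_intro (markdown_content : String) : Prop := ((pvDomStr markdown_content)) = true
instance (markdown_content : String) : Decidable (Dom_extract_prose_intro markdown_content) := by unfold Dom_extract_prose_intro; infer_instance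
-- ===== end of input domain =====

-- B replaces A's line-by-line loop-with-break by a single substring search (find "\n## " on the
-- normalized text) plus a slice; same O(n) cost, a different traversal (objective: idiomatic).

-- ===== PORT A =====
def pvH2 : List Char := ['#', '#', ' ']

-- the `for line in lines: if line.startswith("## "): break; prose_lines.append(line)` loop
def pvProse : List (List Char) → List (List Char)
  | [] => []
  | l :: ls => if PySem.Chars.startswith l pvH2 then [] else l :: pvProse ls

def extract_prose_intro (markdown_content : String) : String :=
  if markdown_content.toList.isEmpty || (PySem.Chars.strip markdown_content.toList).isEmpty then ""
  else
    let lines := PySem.Chars.splitlines markdown_content.toList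
    let prose_lines := pvProse lines
    String.ofList (PySem.Chars.strip (PySem.Chars.join ['\n'] prose_lines))

-- ===== PORT B =====
def pvPat : List Char := ['\n', '#', '#', ' ']

def extract_prose_intro_alt (markdown_content : String) : String :=
  if markdown_content.toList.isEmpty || (PySem.Chars.strip markdown_content.toList).isEmpty then ""
  else
    let normalized := PySem.Chars.join ['\n'] (PySem.Chars.splitlines markdown_content.toList)
    if PySem.Chars.startswith normalized pvH2 then ""
    else
      let idx := PySem.Chars.find normalized pvPat
      if idx = -1 then String.ofList (PySem.Chars.strip normalized)
      else String.ofList (PySem.Chars.strip (PySem.Chars.slice normalized none (some idx)))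

-- ===== PRECONDITION & SPEC =====
def Spec_extract_prose_intro (markdown_content : String) (out : String) : Prop := out = extract_prose_intro_alt markdown_content
instance (markdown_content : String) (out : String) : Decidable (Spec_extract_prose_intro markdown_content out) := by unfold Spec_extract_prose_intro; infer_instance

-- ===== CLAIM (what is proved, stated in full; the proofs are below) =====
def Claim_equal_extract_prose_intro : Prop := ∀ (markdown_content : String), Dom_extract_prose_intro markdown_content → Spec_extract_prose_intro markdown_content (extract_prose_intro markdown_content)

-- ===== LEMMAS AND PROOFS =====

-- every character of every line produced by splitlines.go is a non-break character
theorem pv_go_chars (isB : Char → Bool) (s : List Char) (cur : List Char) (acc : List (List Char)) :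
    (∀ c ∈ cur, isB c = false) → (∀ l ∈ acc, ∀ c ∈ l, isB c = false) →
    ∀ l ∈ PySem.Chars.splitlines.go isB s cur acc, ∀ c ∈ l, isB c = false := by
  fun_induction PySem.Chars.splitlines.go
  case case1 => intro h1 h2 l hl; simp at hl; exact h2 l hl
  case case2 =>
    intro h1 h2 l hl; simp at hl
    rcases hl with h | h
    · exact h2 l h
    · subst h; intro c hc; simp at hc; exact h1 c hc
  case case3 ih =>
    intro h1 h2
    apply ih
    · intro c hc; simp at hc
    · intro l hl c hc
      simp at hl
      rcases hl with h | h
      · subst h; simp at hc; exact h1 c hc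
      · exact h2 l h c hc
  case case4 c rest cur acc hcond ih =>
    intro h1 h2
    apply ih
    · intro c hc; simp at hc
    · intro l hl cc hcc
      simp at hl
      rcases hl with h | h
      · subst h; simp at hcc; exact h1 cc hcc
      · exact h2 l h cc hcc
  case case5 c rest cur acc hpat hcond ih =>
    intro h1 h2
    apply ih
    · intro cc hcc
      simp at hcc
      rcases hcc with h | h
      · subst h; simpa using hcond
      · exact h1 cc h
    · exact h2

theorem pv_splitlines_no_newline (cs : List Char) :
    ∀ l ∈ PySem.Chars.splitlines cs, '\n' ∉ l := by
  intro l hl hmem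
  have h := pv_go_chars _ cs [] [] (by simp) (by simp) l (by simpa [PySem.Chars.splitlines] using hl) '\n' hmem
  simp at h

theorem pv_prefix_append_cons {p l r : List Char} {c : Char} (hc : c ∉ p) :
    p <+: l ++ c :: r ↔ p <+: l := by
  constructor
  · intro h
    by_cases hlen : p.length ≤ l.length
    · have hp := List.prefix_iff_eq_take.mp h
      rw [List.take_append_of_le_length hlen] at hp
      rw [hp]; exact List.take_prefix _ _
    · exfalso
      have hlt : l.length < p.length := by omega
      have hg := h.getElem (i := l.length) hlt
      have : p[l.length] = c := by
        rw [hg]; rw [List.getElem_append_right (le_refl _)]; simp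
      exact hc (this ▸ List.getElem_mem hlt)
  · intro h
    exact h.trans (List.prefix_append l (c :: r))

theorem pv_hjoin (x : List Char) (xs : List (List Char)) :
    pvH2 <+: PySem.Chars.join ['\n'] (x :: xs) ↔ pvH2 <+: x := by
  cases xs with
  | nil => rw [PySem.Chars.join_singleton]
  | cons y ys =>
    rw [PySem.Chars.join_cons_cons]
    have : x ++ ['\n'] ++ PySem.Chars.join ['\n'] (y :: ys)
        = x ++ '\n' :: PySem.Chars.join ['\n'] (y :: ys) := by simp
    rw [this]
    exact pv_prefix_append_cons (by decide)

theorem pv_go_add (sub : List Char) (s : List Char) (k : Nat) :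
    PySem.Chars.find.go sub s k =
      if PySem.Chars.find.go sub s 0 = -1 then -1 else PySem.Chars.find.go sub s 0 + k := by
  induction s generalizing k with
  | nil =>
    simp only [PySem.Chars.find.go]
    split_ifs <;> simp_all <;> omega
  | cons c t ih =>
    have hge : -1 ≤ PySem.Chars.find.go sub t 0 := by
      have := PySem.Chars.neg_one_le_find t sub
      simpa [PySem.Chars.find] using this
    simp only [PySem.Chars.find.go]
    by_cases hp : sub.isPrefixOf (c :: t)
    · simp [hp]
    · simp only [hp, if_false]
      rw [ih (k + 1), ih 1]
      split_ifs <;> omega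

theorem pv_find_cons (sub : List Char) (c : Char) (s' : List Char) (h : ¬ sub <+: (c :: s')) :
    PySem.Chars.find (c :: s') sub =
      if PySem.Chars.find s' sub = -1 then -1 else PySem.Chars.find s' sub + 1 := by
  have hp : sub.isPrefixOf (c :: s') = false := by
    rw [Bool.eq_false_iff]; intro hx; exact h (List.isPrefixOf_iff_prefix.mp hx)
  simp only [PySem.Chars.find, PySem.Chars.find.go, hp, Bool.false_eq_true, if_false]
  rw [pv_go_add]
  rfl

theorem pv_find_cons_pos (sub : List Char) (c : Char) (s' : List Char) (h : sub <+: (c :: s')) :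
    PySem.Chars.find (c :: s') sub = 0 := by
  have hp : sub.isPrefixOf (c :: s') = true := List.isPrefixOf_iff_prefix.mpr h
  simp [PySem.Chars.find, PySem.Chars.find.go, hp]

theorem pv_head_find (l m : List Char) (hl : '\n' ∉ l) :
    PySem.Chars.find (l ++ '\n' :: m) pvPat =
      if PySem.Chars.find ('\n' :: m) pvPat = -1 then -1
      else (l.length : Int) + PySem.Chars.find ('\n' :: m) pvPat := by
  induction l with
  | nil =>
    simp only [List.nil_append, List.length_nil]
    split_ifs <;> omega
  | cons c l' ih =>
    have hc : c ≠ '\n' := by intro h; exact hl (h ▸ List.mem_cons_self ..)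
    have hnp : ¬ pvPat <+: (c :: (l' ++ '\n' :: m)) := by
      intro hp
      rcases List.cons_prefix_cons.mp hp with ⟨h1, _⟩
      exact hc h1.symm
    have hge : -1 ≤ PySem.Chars.find ('\n' :: m) pvPat := PySem.Chars.neg_one_le_find _ _
    rw [List.cons_append, pv_find_cons _ _ _ hnp,
      ih (fun hm => hl (List.mem_cons_of_mem c hm))]
    simp only [List.length_cons]
    split_ifs with h1 h2 <;> push_cast <;> omega

-- the index (in the '\n'-join of the lines) of the '\n' that precedes the first H2 line, -1 if none
def pvFj : List (List Char) → Int
  | [] => -1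
  | [_] => -1
  | l :: t :: ts =>
    if PySem.Chars.startswith t pvH2 then (l.length : Int)
    else if pvFj (t :: ts) = -1 then -1 else (l.length : Int) + 1 + pvFj (t :: ts)

theorem pv_fj_ge (ls : List (List Char)) : -1 ≤ pvFj ls := by
  fun_induction pvFj <;> (try simp_all) <;> (try split_ifs) <;> omega

theorem pv_find_join (ls : List (List Char)) :
    (∀ l ∈ ls, '\n' ∉ l) → PySem.Chars.find (PySem.Chars.join ['\n'] ls) pvPat = pvFj ls := by
  induction ls with
  | nil => intro _; rw [PySem.Chars.join_nil]; decide
  | cons l tl ih =>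
    intro h
    cases tl with
    | nil =>
      rw [PySem.Chars.join_singleton, show pvFj [l] = -1 from rfl,
        PySem.Chars.find_eq_neg_one_iff]
      intro hinf
      exact h l (List.mem_cons_self ..) (hinf.subset (by decide))
    | cons t ts =>
      have hl : '\n' ∉ l := h l (List.mem_cons_self ..)
      have ht : ∀ x ∈ t :: ts, '\n' ∉ x := fun x hx => h x (List.mem_cons_of_mem l hx)
      have hjoin : PySem.Chars.join ['\n'] (l :: t :: ts)
          = l ++ '\n' :: PySem.Chars.join ['\n'] (t :: ts) := by
        rw [PySem.Chars.join_cons_cons]; simp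
      rw [hjoin, pv_head_find _ _ hl]
      by_cases hP : PySem.Chars.startswith t pvH2
      · have hpre : pvPat <+: '\n' :: PySem.Chars.join ['\n'] (t :: ts) := by
          apply List.cons_prefix_cons.mpr
          exact ⟨rfl, (pv_hjoin t ts).mpr ((PySem.Chars.startswith_iff t pvH2).mp hP)⟩
        rw [pv_find_cons_pos _ _ _ hpre]
        simp [pvFj, hP]
      · have hnp : ¬ pvPat <+: '\n' :: PySem.Chars.join ['\n'] (t :: ts) := by
          intro hp
          rcases List.cons_prefix_cons.mp hp with ⟨_, h2⟩
          exact hP ((PySem.Chars.startswith_iff t pvH2).mpr ((pv_hjoin t ts).mp h2))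
        rw [pv_find_cons _ _ _ hnp, ih ht]
        simp only [pvFj, hP, Bool.false_eq_true, if_false]
        have := pv_fj_ge (t :: ts)
        split_ifs <;> omega

theorem pv_fj_none (l : List Char) (tl : List (List Char)) (h : pvFj (l :: tl) = -1) :
    pvProse tl = tl := by
  induction tl generalizing l with
  | nil => rfl
  | cons t ts ih =>
    have hfge := pv_fj_ge (t :: ts)
    by_cases hP : PySem.Chars.startswith t pvH2
    · exfalso; simp only [pvFj, hP, if_true] at h; omega
    · simp only [pvFj, hP, Bool.false_eq_true, if_false] at h
      have hr : pvFj (t :: ts) = -1 := by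
        by_contra hne; rw [if_neg hne] at h; omega
      simp only [pvProse, hP, Bool.false_eq_true, if_false]
      rw [ih t hr]

theorem pv_fj_take (l : List Char) (tl : List (List Char)) (k : Nat)
    (h : pvFj (l :: tl) = (k : Int)) :
    List.take k (PySem.Chars.join ['\n'] (l :: tl)) = PySem.Chars.join ['\n'] (l :: pvProse tl) := by
  induction tl generalizing l k with
  | nil => exfalso; simp only [pvFj] at h; omega
  | cons t ts ih =>
    have hjoin : PySem.Chars.join ['\n'] (l :: t :: ts)
        = l ++ '\n' :: PySem.Chars.join ['\n'] (t :: ts) := by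
      rw [PySem.Chars.join_cons_cons]; simp
    by_cases hP : PySem.Chars.startswith t pvH2
    · simp only [pvFj, hP, if_true] at h
      have hk : k = l.length := by omega
      subst hk
      rw [hjoin, List.take_left]
      simp [pvProse, hP, PySem.Chars.join_singleton]
    · simp only [pvFj, hP, Bool.false_eq_true, if_false] at h
      have hfge := pv_fj_ge (t :: ts)
      have hne : pvFj (t :: ts) ≠ -1 := by
        intro hz; rw [if_pos hz] at h; omega
      rw [if_neg hne] at h
      set r := pvFj (t :: ts) with hr
      have hr0 : 0 ≤ r := by omega
      have hkeq : k = l.length + 1 + r.toNat := by omega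
      have hih := ih t r.toNat (by omega)
      rw [hjoin, hkeq]
      have : List.take (l.length + 1 + r.toNat) (l ++ '\n' :: PySem.Chars.join ['\n'] (t :: ts))
          = l ++ List.take (1 + r.toNat) ('\n' :: PySem.Chars.join ['\n'] (t :: ts)) := by
        rw [show l.length + 1 + r.toNat = l.length + (1 + r.toNat) by omega, List.take_append]
        congr 1
        · exact List.take_of_length_le (by omega)
        · congr 1; omega
      rw [this]
      have h1 : List.take (1 + r.toNat) ('\n' :: PySem.Chars.join ['\n'] (t :: ts))
          = '\n' :: List.take r.toNat (PySem.Chars.join ['\n'] (t :: ts)) := by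
        rw [show 1 + r.toNat = r.toNat + 1 by omega]; rfl
      rw [h1, hih]
      simp only [pvProse, hP, Bool.false_eq_true, if_false]
      rw [PySem.Chars.join_cons_cons]
      simp

-- ===== VERDICT (by name: the statement is the Claim_ definition above) =====
theorem extract_prose_intro_spec : Claim_equal_extract_prose_intro := by
  intro s _
  unfold Spec_extract_prose_intro extract_prose_intro extract_prose_intro_alt
  by_cases hguard : s.toList.isEmpty || (PySem.Chars.strip s.toList).isEmpty
  · simp [hguard]
  · simp only [hguard, Bool.false_eq_true, if_false]
    have hnl := pv_splitlines_no_newline s.toList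
    cases hls : PySem.Chars.splitlines s.toList with
    | nil =>
      simp [pvProse, show PySem.Chars.startswith [] pvH2 = false from by decide,
        show PySem.Chars.find [] pvPat = -1 from by decide]
    | cons l tl =>
      rw [hls] at hnl
      by_cases hP : PySem.Chars.startswith l pvH2
      · have : PySem.Chars.startswith (PySem.Chars.join ['\n'] (l :: tl)) pvH2 = true := by
          rw [PySem.Chars.startswith_iff]
          exact (pv_hjoin l tl).mpr ((PySem.Chars.startswith_iff l pvH2).mp hP)
        simp [this, pvProse, hP, PySem.Chars.join_nil, PySem.Chars.strip,
          PySem.Chars.lstrip, PySem.Chars.rstrip]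
      · have hsw : PySem.Chars.startswith (PySem.Chars.join ['\n'] (l :: tl)) pvH2 = false := by
          rw [Bool.eq_false_iff]
          intro hx
          exact hP ((PySem.Chars.startswith_iff l pvH2).mpr ((pv_hjoin l tl).mp
            ((PySem.Chars.startswith_iff _ pvH2).mp hx)))
        simp only [hsw, Bool.false_eq_true, if_false]
        rw [pv_find_join _ hnl]
        by_cases hfj : pvFj (l :: tl) = -1
        · rw [if_pos hfj]
          simp only [pvProse, hP, Bool.false_eq_true, if_false]
          rw [pv_fj_none l tl hfj]
        · rw [if_neg hfj]
          have hge := pv_fj_ge (l :: tl)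
          have h0 : 0 ≤ pvFj (l :: tl) := by omega
          have hk : pvFj (l :: tl) = ((pvFj (l :: tl)).toNat : Int) := by omega
          rw [PySem.Chars.slice_eq_listSlice, PySem.List.slice_to _ h0,
            pv_fj_take l tl _ hk]
          simp only [pvProse, hP, Bool.false_eq_true, if_false]
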